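-- pv_equiv track=rewrite | github.com/ramilchai/CS112_PythonProject | rchaimon_209_P3.py | even_product_2d
-- ===== SOURCE A (Python) =====
-- def even_product_2d(grid):
--
-- 	multisum = 1
-- 	product = []
--
-- 	if grid == []:
-- 		return multisum
-- 	else:
-- 		for group in grid:
-- 			if group == []:
-- 				pass
-- 			for i in group:
-- 				if i % 2 == 0:
-- 					product.append(i)
-- 				elif i == []:
-- 					pass
-- 				else:
-- 					pass
--
-- 		for j in product:
-- 			multisum = multisum * j
--
-- 		return multisum
-- ===== SOURCE B (Python) =====
-- def even_product_2d(grid):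
--     # Recursive decomposition: the answer for a grid is the even-product of its
--     # first row times the answer for the remaining rows; each row's even-product
--     # is itself computed by structural recursion. Multiplication is associative
--     # and commutative, so grouping by rows right-to-left gives the same value
--     # as A's flat left-to-right pass.
--     if not grid:
--         return 1
--     return _row_even_product(grid[0]) * even_product_2d(grid[1:])
--
-- def _row_even_product(row):
--     if not row:
--         return 1
--     rest = _row_even_product(row[1:])
--     return row[0] * rest if row[0] % 2 == 0 else rest
-- ===== Notes on version B (the rewrite author's own statement) =====
-- stated objective: alternative
-- what changed: B replaces A's two-phase iterative collect-then-multiply (append evens to a list, then left-fold multiply) with a structural recursion that computes each row's even-product recursively and combines the row products right-to-left, never materialising a list.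
import Mathlib
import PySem

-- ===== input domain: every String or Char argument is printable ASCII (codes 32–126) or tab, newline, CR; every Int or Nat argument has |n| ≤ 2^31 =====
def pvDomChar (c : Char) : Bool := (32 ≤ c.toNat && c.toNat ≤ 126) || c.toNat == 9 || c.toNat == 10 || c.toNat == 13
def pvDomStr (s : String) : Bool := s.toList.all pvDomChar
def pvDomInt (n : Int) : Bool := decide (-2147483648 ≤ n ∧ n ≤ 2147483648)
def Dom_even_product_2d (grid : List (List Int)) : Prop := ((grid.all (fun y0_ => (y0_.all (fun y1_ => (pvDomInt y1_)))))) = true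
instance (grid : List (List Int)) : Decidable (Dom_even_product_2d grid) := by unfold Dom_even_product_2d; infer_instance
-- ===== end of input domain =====

-- B replaces A's collect-then-multiply loops with a structural recursion combining per-row even-products (return value equivalence).
-- ===== PORT A =====
def even_product_2d (grid : List (List Int)) : Int :=
  let multisum : Int := 1
  let product : List Int := []
  if grid = [] then multisum
  else
    let product := grid.foldl (fun product group =>
      group.foldl (fun product i =>
        if i % 2 == 0 then product ++ [i] else product) product) product
    let multisum := product.foldl (fun multisum j => multisum * j) multisum
    multisum

-- ===== PORT B =====
def pvRowEvenProduct : List Int → Int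
  | [] => 1
  | x :: t =>
    let rest := pvRowEvenProduct t
    if x % 2 == 0 then x * rest else rest

def even_product_2d_alt : List (List Int) → Int
  | [] => 1
  | r :: t => pvRowEvenProduct r * even_product_2d_alt t

-- ===== PRECONDITION & SPEC =====
def Spec_even_product_2d (grid : List (List Int)) (out : Int) : Prop := out = even_product_2d_alt grid
instance (grid : List (List Int)) (out : Int) : Decidable (Spec_even_product_2d grid out) := by unfold Spec_even_product_2d; infer_instance

-- ===== CLAIM (what is proved, stated in full; the proofs are below) =====
def Claim_equal_even_product_2d : Prop := ∀ (grid : List (List Int)), Dom_even_product_2d grid → Spec_even_product_2d grid (even_product_2d grid)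

-- ===== LEMMAS AND PROOFS =====

-- A's inner append-collect loop over one row appends the row's evens.
theorem pv_row_collect (r p : List Int) :
    r.foldl (fun product i => if i % 2 == 0 then product ++ [i] else product) p
      = p ++ r.filter (fun i => i % 2 == 0) := by
  induction r generalizing p with
  | nil => simp
  | cons a t ih =>
    simp only [List.foldl_cons, List.filter_cons]
    by_cases h : a % 2 == 0
    · rw [if_pos h, if_pos h, ih]; simp
    · rw [if_neg h, if_neg h, ih]

-- A's outer collect loop produces the concatenation of the rows' evens.
theorem pv_collect (grid : List (List Int)) (p : List Int) :
    grid.foldl (fun product group =>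
        group.foldl (fun product i => if i % 2 == 0 then product ++ [i] else product) product) p
      = p ++ (grid.map (fun r => r.filter (fun i => i % 2 == 0))).flatten := by
  induction grid generalizing p with
  | nil => simp
  | cons r t ih =>
    rw [List.foldl_cons, pv_row_collect, ih]
    simp

-- Left-fold multiplication is m times the list product.
theorem pv_foldl_mul (l : List Int) (m : Int) :
    l.foldl (fun a j => a * j) m = m * l.prod := by
  induction l generalizing m with
  | nil => simp
  | cons a t ih => rw [List.foldl_cons, ih, List.prod_cons, mul_assoc]

-- B's row helper is the product of the row's evens.
theorem pv_row_even_product (r : List Int) :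
    pvRowEvenProduct r = (r.filter (fun i => i % 2 == 0)).prod := by
  induction r with
  | nil => rfl
  | cons a t ih =>
    simp only [pvRowEvenProduct, List.filter_cons]
    by_cases h : a % 2 == 0
    · rw [if_pos h, if_pos h, List.prod_cons, ih]
    · rw [if_neg h, if_neg h, ih]

-- B equals the product of the flattened evens.
theorem pv_alt_prod (grid : List (List Int)) :
    even_product_2d_alt grid = (grid.map (fun r => r.filter (fun i => i % 2 == 0))).flatten.prod := by
  induction grid with
  | nil => rfl
  | cons r t ih =>
    rw [even_product_2d_alt, ih, List.map_cons, List.flatten_cons, List.prod_append,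
        pv_row_even_product]

-- ===== VERDICT (by name: the statement is the Claim_ definition above) =====
theorem even_product_2d_spec : Claim_equal_even_product_2d := by
  intro grid _
  unfold Spec_even_product_2d even_product_2d
  by_cases h : grid = []
  · simp [h, even_product_2d_alt]
  · simp only [if_neg h, pv_collect, List.nil_append, pv_foldl_mul, pv_alt_prod, one_mul]
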